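-- pv_equiv track=rewrite | github.com/grondak/t5code | src/t5code/T5Lot.py | determine_buying_trade_classifications_effects
-- ===== SOURCE A (Python) =====
-- from typing import TYPE_CHECKING, Dict, Tuple
--
-- def determine_buying_trade_classifications_effects(
--     trade_classifications: str, trade_classifictions_table: Dict[str, int]
-- ) -> int:
--     """Calculate total modifier from trade classifications when buying.
--
--     Sums up all modifiers from matching trade codes in the buying table.
--
--     Args:
--         trade_classifications: Space-separated trade codes
--         trade_classifictions_table: Buying modifiers table
--
--     Returns:
--         Total credit modifier (can be positive or negative)
--     """
--     effect = 0
--     for classification in trade_classifications.split():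
--         if classification in trade_classifictions_table:
--             effect += trade_classifictions_table[classification]
--     return effect
-- ===== SOURCE B (Python) =====
-- def determine_buying_trade_classifications_effects(trade_classifications, trade_classifictions_table):
--     tokens = trade_classifications.split()
--     return sum(modifier * tokens.count(code)
--                for code, modifier in trade_classifictions_table.items())
-- ===== Notes on version B (the rewrite author's own statement) =====
-- stated objective: alternative
-- what changed: B is driven by the table instead of the token stream: it iterates over the table's (code, modifier) items and adds modifier * tokens.count(code), replacing A's per-token scan with membership test and lookup.
import Mathlib
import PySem

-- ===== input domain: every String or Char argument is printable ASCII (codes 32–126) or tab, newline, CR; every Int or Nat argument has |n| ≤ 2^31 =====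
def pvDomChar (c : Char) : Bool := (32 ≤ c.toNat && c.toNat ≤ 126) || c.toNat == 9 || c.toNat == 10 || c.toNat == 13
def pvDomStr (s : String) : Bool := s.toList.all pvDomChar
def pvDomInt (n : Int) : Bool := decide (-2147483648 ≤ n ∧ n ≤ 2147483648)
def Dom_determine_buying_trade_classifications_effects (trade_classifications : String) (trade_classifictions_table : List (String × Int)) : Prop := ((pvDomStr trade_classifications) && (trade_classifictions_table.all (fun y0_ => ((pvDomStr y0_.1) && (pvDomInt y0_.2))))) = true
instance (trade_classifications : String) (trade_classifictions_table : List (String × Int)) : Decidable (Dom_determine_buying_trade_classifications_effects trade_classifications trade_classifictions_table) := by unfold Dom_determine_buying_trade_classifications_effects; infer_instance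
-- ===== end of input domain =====

-- B is driven by the table, not the token stream: it sums modifier × tokens.count(code) over the
-- table's items, replacing A's per-token lookup loop; same totals, no speed claim (objective: alternative).

-- ===== PORT A =====
-- dict membership / lookup on the association list (first match, as per the type convention)
def pvTblGetA? (tbl : List (String × Int)) (k : String) : Option Int :=
  (tbl.find? (fun p => p.1 == k)).map (·.2)

def determine_buying_trade_classifications_effects (trade_classifications : String) (trade_classifictions_table : List (String × Int)) : Int :=
  (PySem.Str.split₀ trade_classifications).foldl
    (fun effect classification =>
      if (pvTblGetA? trade_classifictions_table classification).isSome then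
        effect + (pvTblGetA? trade_classifictions_table classification).getD 0
      else effect)
    0

-- ===== PORT B =====
def determine_buying_trade_classifications_effects_alt (trade_classifications : String) (trade_classifictions_table : List (String × Int)) : Int :=
  let tokens := PySem.Str.split₀ trade_classifications
  trade_classifictions_table.foldl
    (fun acc p => acc + p.2 * (PySem.List.count tokens p.1 : Int)) 0

-- ===== PRECONDITION & SPEC =====
-- Pre_ requires the association list to have pairwise-distinct keys: it represents a Python dict,
-- which cannot hold duplicate keys, so duplicate-key lists correspond to no Python input at all.
def Pre_determine_buying_trade_classifications_effects (trade_classifications : String) (trade_classifictions_table : List (String × Int)) : Prop :=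
  (trade_classifictions_table.map Prod.fst).Nodup
instance (trade_classifications : String) (trade_classifictions_table : List (String × Int)) : Decidable (Pre_determine_buying_trade_classifications_effects trade_classifications trade_classifictions_table) := by unfold Pre_determine_buying_trade_classifications_effects; infer_instance

def pvWitness_determine_buying_trade_classifications_effects : String × (List (String × Int)) :=
  ("Ag Ri Ag", [("Ag", 2), ("Ri", -1)])

def Spec_determine_buying_trade_classifications_effects (trade_classifications : String) (trade_classifictions_table : List (String × Int)) (out : Int) : Prop := out = determine_buying_trade_classifications_effects_alt trade_classifications trade_classifictions_table
instance (trade_classifications : String) (trade_classifictions_table : List (String × Int)) (out : Int) : Decidable (Spec_determine_buying_trade_classifications_effects trade_classifications trade_classifictions_table out) := by unfold Spec_determine_buying_trade_classifications_effects; infer_instance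

-- ===== CLAIM (what is proved, stated in full; the proofs are below) =====
def Claim_equal_determine_buying_trade_classifications_effects : Prop := ∀ (trade_classifications : String) (trade_classifictions_table : List (String × Int)), Dom_determine_buying_trade_classifications_effects trade_classifications trade_classifictions_table → Pre_determine_buying_trade_classifications_effects trade_classifications trade_classifictions_table → Spec_determine_buying_trade_classifications_effects trade_classifications trade_classifictions_table (determine_buying_trade_classifications_effects trade_classifications trade_classifictions_table)

-- ===== LEMMAS AND PROOFS =====

-- the value A adds per token (0 when the code is absent)
def pvG (tbl : List (String × Int)) (k : String) : Int := (pvTblGetA? tbl k).getD 0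

theorem pvG_cons (a : String) (b : Int) (rest : List (String × Int)) (k : String) :
    pvG ((a, b) :: rest) k = if a = k then b else pvG rest k := by
  by_cases h : a = k
  · simp [pvG, pvTblGetA?, List.find?_cons_of_pos, h]
  · rw [if_neg h]
    unfold pvG pvTblGetA?
    rw [List.find?_cons_of_neg]
    simpa using h

theorem pvG_not_mem (tbl : List (String × Int)) (a : String)
    (h : a ∉ tbl.map Prod.fst) : pvG tbl a = 0 := by
  induction tbl with
  | nil => simp [pvG, pvTblGetA?]
  | cons p rest ih =>
    simp only [List.map_cons, List.mem_cons, not_or] at h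
    rcases p with ⟨x, y⟩
    rw [pvG_cons, if_neg (fun hx => h.1 hx.symm)]
    exact ih h.2

theorem pvFoldA (tbl : List (String × Int)) : ∀ (l : List String) (init : Int),
    l.foldl (fun effect classification =>
      if (pvTblGetA? tbl classification).isSome then
        effect + (pvTblGetA? tbl classification).getD 0
      else effect) init = init + (l.map (pvG tbl)).sum := by
  intro l
  induction l with
  | nil => intro init; simp
  | cons t rest ih =>
    intro init
    cases h : pvTblGetA? tbl t with
    | none => simp [List.foldl_cons, h, ih, pvG]
    | some v => simp [List.foldl_cons, h, ih, pvG, add_assoc]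

theorem pvFoldB (toks : List String) : ∀ (tbl : List (String × Int)) (init : Int),
    tbl.foldl (fun acc p => acc + p.2 * (PySem.List.count toks p.1 : Int)) init
      = init + (tbl.map (fun p => p.2 * (List.count p.1 toks : Int))).sum := by
  intro tbl
  induction tbl with
  | nil => intro init; simp
  | cons p rest ih =>
    intro init
    rw [List.foldl_cons, ih, PySem.List.count_eq]
    simp [add_assoc]

-- pointwise split of a sum of an if-function, given the 'then'-key contributes 0 to f
theorem pvSumIf (a : String) (b : Int) (f : String → Int) (hf : f a = 0) :
    ∀ (toks : List String),
    (toks.map (fun t => if a = t then b else f t)).sum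
      = b * (List.count a toks : Int) + (toks.map f).sum := by
  intro toks
  induction toks with
  | nil => simp
  | cons t rest ih =>
    by_cases h : a = t
    · subst h
      simp [ih, hf, List.count_cons_self]
      ring_nf
    · have hne : ¬ (t = a) := fun hx => h hx.symm
      simp only [List.map_cons, List.sum_cons, if_neg h, ih,
        List.count_cons, beq_iff_eq, if_neg hne]
      ring

-- the heart: token-driven sum of lookups = table-driven sum of modifier × count (distinct keys)
theorem pvKey (toks : List String) : ∀ (tbl : List (String × Int)),
    (tbl.map Prod.fst).Nodup →
    (toks.map (pvG tbl)).sum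
      = (tbl.map (fun p => p.2 * (List.count p.1 toks : Int))).sum := by
  intro tbl
  induction tbl with
  | nil =>
    intro _
    simp [show pvG [] = fun _ => (0 : Int) from rfl]
  | cons p rest ih =>
    intro hnd
    rcases p with ⟨a, b⟩
    simp only [List.map_cons, List.nodup_cons] at hnd
    have h0 : pvG rest a = 0 := pvG_not_mem rest a hnd.1
    have hcons : (toks.map (pvG ((a, b) :: rest))).sum
        = (toks.map (fun t => if a = t then b else pvG rest t)).sum := by
      congr 1; exact List.map_congr_left (fun t _ => pvG_cons a b rest t)
    rw [hcons, pvSumIf a b (pvG rest) h0 toks, ih hnd.2]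
    simp

-- ===== VERDICT (by name: the statement is the Claim_ definition above) =====
theorem determine_buying_trade_classifications_effects_spec : Claim_equal_determine_buying_trade_classifications_effects := by
  intro tc tbl _ hpre
  unfold Spec_determine_buying_trade_classifications_effects
  unfold determine_buying_trade_classifications_effects determine_buying_trade_classifications_effects_alt
  rw [pvFoldA, pvFoldB]
  rw [pvKey (PySem.Str.split₀ tc) tbl hpre]
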